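-- pv_equiv track=rewrite | github.com/debashishroy00/wpa | backend/app/api/v1/endpoints/financial.py | map_legacy_subcategory
-- ===== SOURCE A (Python) =====
-- def map_legacy_subcategory(category: str, subcategory: str, description: str) -> str:
--     """
--     Map legacy subcategories and descriptions to standardized subcategory values
--     """
--     if not subcategory:
--         subcategory = ""
--
--     subcategory_lower = subcategory.lower()
--     description_lower = description.lower()
--
--     if category == "assets":
--         # If already using new format, keep it
--         if subcategory in ['cash_bank_accounts', 'investment_accounts', 'retirement_accounts',
--                           'real_estate', 'personal_property', 'business_assets', 'other_assets']:
--             return subcategory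
--
--         # Map legacy categories and descriptions
--         if any(keyword in description_lower for keyword in ['401k', '401(k)', 'retirement']):
--             return 'retirement_accounts'
--         elif any(keyword in description_lower for keyword in ['checking', 'savings', 'money market', 'cd']):
--             return 'cash_bank_accounts'
--         elif any(keyword in subcategory_lower for keyword in ['cash']) or 'checking' in description_lower:
--             return 'cash_bank_accounts'
--         elif any(keyword in description_lower for keyword in ['mutual fund', 'etf', "etf's"]) or 'investments' in subcategory_lower:
--             return 'investment_accounts'
--         elif any(keyword in description_lower for keyword in ['home', 'house', 'property', 'residence']):
--             return 'real_estate'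
--         elif any(keyword in description_lower for keyword in ['jewelry']):
--             return 'personal_property'
--         else:
--             return 'other_assets'
--
--     elif category == "liabilities":
--         if subcategory in ['mortgage_real_estate', 'credit_cards', 'auto_loans', 'student_loans', 'personal_loans', 'other_debt']:
--             return subcategory
--         elif any(keyword in description_lower for keyword in ['credit', 'card']):
--             return 'credit_cards'
--         elif any(keyword in description_lower for keyword in ['mortgage', 'home loan']):
--             return 'mortgage_real_estate'
--         else:
--             return 'other_debt'
--
--     elif category == "income":
--         if subcategory in ['employment_income', 'business_income', 'investment_income', 'rental_income', 'passive_income', 'other_income']: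
--             return subcategory
--         elif any(keyword in description_lower for keyword in ['salary', 'rsu', 'contribution']):
--             return 'employment_income'
--         elif 'rental' in description_lower:
--             return 'rental_income'
--         else:
--             return 'other_income'
--
--     elif category == "expenses":
--         if subcategory in ['housing', 'utilities', 'transportation', 'food', 'healthcare', 'personal', 'other_expenses']:
--             return subcategory
--         elif any(keyword in subcategory_lower for keyword in ['food', 'entertainment', 'shopping', 'subscription']):
--             return 'personal'
--         elif 'utilities' in subcategory_lower:
--             return 'utilities'
--         elif 'transportation' in subcategory_lower:
--             return 'transportation'
--         elif 'healthcare' in subcategory_lower: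
--             return 'healthcare'
--         elif any(keyword in description_lower for keyword in ['merchandise', 'shopping', 'retail', 'amazon', 'walmart', 'target']):
--             return 'personal'
--         elif any(keyword in description_lower for keyword in ['mortgage', 'rent', 'property tax']):
--             return 'housing'
--         elif any(keyword in description_lower for keyword in ['restaurant', 'grocery', 'food', 'dining']):
--             return 'food'
--         elif any(keyword in description_lower for keyword in ['gas', 'uber', 'lyft', 'parking']):
--             return 'transportation'
--         elif any(keyword in description_lower for keyword in ['doctor', 'medical', 'pharmacy', 'gym']):
--             return 'healthcare'
--         elif any(keyword in description_lower for keyword in ['electric', 'water', 'internet', 'phone', 'utilities']):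
--             return 'utilities'
--         else:
--             return 'personal'  # Default to personal for general expenses
--
--     return 'other_assets'  # Default fallback
-- ===== SOURCE B (Python) =====
-- # Different decomposition: no if/elif cascade and no early return.  One flat
-- # priority-ordered rules list per category; the answer is built BACK-TO-FRONT
-- # with an overwriting accumulator: start from the default, walk the rules in
-- # REVERSE priority order and overwrite the answer whenever a rule matches, so
-- # the highest-priority matching rule wins last; finally the exact keep-list
-- # pass-through overwrites everything.
--
-- RULES = {
--     "assets": (
--         ('cash_bank_accounts', 'investment_accounts', 'retirement_accounts',
--          'real_estate', 'personal_property', 'business_assets', 'other_assets'),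
--         [("d", ('401k', '401(k)', 'retirement'), 'retirement_accounts'),
--          ("d", ('checking', 'savings', 'money market', 'cd'), 'cash_bank_accounts'),
--          ("s", ('cash',), 'cash_bank_accounts'),
--          ("d", ('checking',), 'cash_bank_accounts'),
--          ("d", ('mutual fund', 'etf', "etf's"), 'investment_accounts'),
--          ("s", ('investments',), 'investment_accounts'),
--          ("d", ('home', 'house', 'property', 'residence'), 'real_estate'),
--          ("d", ('jewelry',), 'personal_property')],
--         'other_assets'),
--     "liabilities": (
--         ('mortgage_real_estate', 'credit_cards', 'auto_loans', 'student_loans',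
--          'personal_loans', 'other_debt'),
--         [("d", ('credit', 'card'), 'credit_cards'),
--          ("d", ('mortgage', 'home loan'), 'mortgage_real_estate')],
--         'other_debt'),
--     "income": (
--         ('employment_income', 'business_income', 'investment_income',
--          'rental_income', 'passive_income', 'other_income'),
--         [("d", ('salary', 'rsu', 'contribution'), 'employment_income'),
--          ("d", ('rental',), 'rental_income')],
--         'other_income'),
--     "expenses": (
--         ('housing', 'utilities', 'transportation', 'food', 'healthcare',
--          'personal', 'other_expenses'),
--         [("s", ('food', 'entertainment', 'shopping', 'subscription'), 'personal'),
--          ("s", ('utilities',), 'utilities'),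
--          ("s", ('transportation',), 'transportation'),
--          ("s", ('healthcare',), 'healthcare'),
--          ("d", ('merchandise', 'shopping', 'retail', 'amazon', 'walmart', 'target'), 'personal'),
--          ("d", ('mortgage', 'rent', 'property tax'), 'housing'),
--          ("d", ('restaurant', 'grocery', 'food', 'dining'), 'food'),
--          ("d", ('gas', 'uber', 'lyft', 'parking'), 'transportation'),
--          ("d", ('doctor', 'medical', 'pharmacy', 'gym'), 'healthcare'),
--          ("d", ('electric', 'water', 'internet', 'phone', 'utilities'), 'utilities')],
--         'personal'),
-- }
--
--
-- def map_legacy_subcategory(category: str, subcategory: str, description: str) -> str: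
--     entry = RULES.get(category)
--     if entry is None:
--         return 'other_assets'
--     keep, rules, result = entry
--     sl = subcategory.lower()
--     dl = description.lower()
--     # build the answer back-to-front: later overwrites encode higher priority
--     for field, keywords, label in reversed(rules):
--         text = dl if field == "d" else sl
--         if any(k in text for k in keywords):
--             result = label
--     if subcategory in keep:
--         result = subcategory
--     return result
-- ===== Notes on version B (the rewrite author's own statement) =====
-- stated objective: alternative
-- what changed: Replaces A's four short-circuiting if/elif cascades by one flat priority-ordered rules table per category folded in REVERSE order with an overwriting accumulator (every rule is evaluated, no early return; the answer is built back-to-front, the keep-list pass-through overwriting last).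
import Mathlib
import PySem

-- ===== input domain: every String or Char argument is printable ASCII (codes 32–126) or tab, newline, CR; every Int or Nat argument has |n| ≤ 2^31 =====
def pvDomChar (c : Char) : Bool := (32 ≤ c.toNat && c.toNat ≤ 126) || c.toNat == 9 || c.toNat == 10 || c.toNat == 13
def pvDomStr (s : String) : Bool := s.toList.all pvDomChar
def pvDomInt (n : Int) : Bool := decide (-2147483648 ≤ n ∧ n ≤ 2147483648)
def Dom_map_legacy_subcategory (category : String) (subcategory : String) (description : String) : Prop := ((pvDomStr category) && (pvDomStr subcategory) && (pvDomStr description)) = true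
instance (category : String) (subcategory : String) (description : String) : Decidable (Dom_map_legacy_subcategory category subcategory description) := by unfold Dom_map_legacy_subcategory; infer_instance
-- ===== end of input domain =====

-- B replaces A's short-circuiting if/elif cascades by a flat per-category
-- rules table folded in REVERSE order with an overwriting accumulator (the
-- answer is built back-to-front, no early return); same return value.

-- ===== PORT A =====
def map_legacy_subcategory (category : String) (subcategory : String) (description : String) : String :=
  -- 'if not subcategory: subcategory = ""' — on str inputs a no-op kept literally
  let subcategory := if subcategory == "" then "" else subcategory
  let subcategory_lower := PySem.Str.lower subcategory
  let description_lower := PySem.Str.lower description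
  if category == "assets" then
    if ["cash_bank_accounts", "investment_accounts", "retirement_accounts",
        "real_estate", "personal_property", "business_assets", "other_assets"].contains subcategory then
      subcategory
    else if ["401k", "401(k)", "retirement"].any (fun k => PySem.Str.isIn k description_lower) then
      "retirement_accounts"
    else if ["checking", "savings", "money market", "cd"].any (fun k => PySem.Str.isIn k description_lower) then
      "cash_bank_accounts"
    else if (["cash"].any (fun k => PySem.Str.isIn k subcategory_lower)) || PySem.Str.isIn "checking" description_lower then
      "cash_bank_accounts"
    else if (["mutual fund", "etf", "etf's"].any (fun k => PySem.Str.isIn k description_lower)) || PySem.Str.isIn "investments" subcategory_lower then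
      "investment_accounts"
    else if ["home", "house", "property", "residence"].any (fun k => PySem.Str.isIn k description_lower) then
      "real_estate"
    else if ["jewelry"].any (fun k => PySem.Str.isIn k description_lower) then
      "personal_property"
    else
      "other_assets"
  else if category == "liabilities" then
    if ["mortgage_real_estate", "credit_cards", "auto_loans", "student_loans", "personal_loans", "other_debt"].contains subcategory then
      subcategory
    else if ["credit", "card"].any (fun k => PySem.Str.isIn k description_lower) then
      "credit_cards"
    else if ["mortgage", "home loan"].any (fun k => PySem.Str.isIn k description_lower) then
      "mortgage_real_estate"
    else
      "other_debt"
  else if category == "income" then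
    if ["employment_income", "business_income", "investment_income", "rental_income", "passive_income", "other_income"].contains subcategory then
      subcategory
    else if ["salary", "rsu", "contribution"].any (fun k => PySem.Str.isIn k description_lower) then
      "employment_income"
    else if PySem.Str.isIn "rental" description_lower then
      "rental_income"
    else
      "other_income"
  else if category == "expenses" then
    if ["housing", "utilities", "transportation", "food", "healthcare", "personal", "other_expenses"].contains subcategory then
      subcategory
    else if ["food", "entertainment", "shopping", "subscription"].any (fun k => PySem.Str.isIn k subcategory_lower) then
      "personal"
    else if PySem.Str.isIn "utilities" subcategory_lower then
      "utilities"
    else if PySem.Str.isIn "transportation" subcategory_lower then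
      "transportation"
    else if PySem.Str.isIn "healthcare" subcategory_lower then
      "healthcare"
    else if ["merchandise", "shopping", "retail", "amazon", "walmart", "target"].any (fun k => PySem.Str.isIn k description_lower) then
      "personal"
    else if ["mortgage", "rent", "property tax"].any (fun k => PySem.Str.isIn k description_lower) then
      "housing"
    else if ["restaurant", "grocery", "food", "dining"].any (fun k => PySem.Str.isIn k description_lower) then
      "food"
    else if ["gas", "uber", "lyft", "parking"].any (fun k => PySem.Str.isIn k description_lower) then
      "transportation"
    else if ["doctor", "medical", "pharmacy", "gym"].any (fun k => PySem.Str.isIn k description_lower) then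
      "healthcare"
    else if ["electric", "water", "internet", "phone", "utilities"].any (fun k => PySem.Str.isIn k description_lower) then
      "utilities"
    else
      "personal"
  else
    "other_assets"

-- ===== PORT B =====
-- a rule: (field: true = description, false = subcategory; keywords; label)
abbrev pvRule : Type := Bool × List String × String

-- Source B's RULES table: category ↦ (keep-list, priority-ordered rules, default)
def pvRulesTable : PySem.Dict String (List String × List pvRule × String) := ⟨
  [("assets",
    (["cash_bank_accounts", "investment_accounts", "retirement_accounts",
      "real_estate", "personal_property", "business_assets", "other_assets"],
     [(true, ["401k", "401(k)", "retirement"], "retirement_accounts"),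
      (true, ["checking", "savings", "money market", "cd"], "cash_bank_accounts"),
      (false, ["cash"], "cash_bank_accounts"),
      (true, ["checking"], "cash_bank_accounts"),
      (true, ["mutual fund", "etf", "etf's"], "investment_accounts"),
      (false, ["investments"], "investment_accounts"),
      (true, ["home", "house", "property", "residence"], "real_estate"),
      (true, ["jewelry"], "personal_property")],
     "other_assets")),
   ("liabilities",
    (["mortgage_real_estate", "credit_cards", "auto_loans", "student_loans",
      "personal_loans", "other_debt"],
     [(true, ["credit", "card"], "credit_cards"),
      (true, ["mortgage", "home loan"], "mortgage_real_estate")],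
     "other_debt")),
   ("income",
    (["employment_income", "business_income", "investment_income",
      "rental_income", "passive_income", "other_income"],
     [(true, ["salary", "rsu", "contribution"], "employment_income"),
      (true, ["rental"], "rental_income")],
     "other_income")),
   ("expenses",
    (["housing", "utilities", "transportation", "food", "healthcare",
      "personal", "other_expenses"],
     [(false, ["food", "entertainment", "shopping", "subscription"], "personal"),
      (false, ["utilities"], "utilities"),
      (false, ["transportation"], "transportation"),
      (false, ["healthcare"], "healthcare"),
      (true, ["merchandise", "shopping", "retail", "amazon", "walmart", "target"], "personal"),
      (true, ["mortgage", "rent", "property tax"], "housing"),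
      (true, ["restaurant", "grocery", "food", "dining"], "food"),
      (true, ["gas", "uber", "lyft", "parking"], "transportation"),
      (true, ["doctor", "medical", "pharmacy", "gym"], "healthcare"),
      (true, ["electric", "water", "internet", "phone", "utilities"], "utilities")],
     "personal"))]⟩

-- Source B's loop body: overwrite the accumulator whenever the rule matches
def pvOverwrite (sl dl : String) (acc : String) (r : pvRule) : String :=
  let text := if r.1 then dl else sl
  if r.2.1.any (fun k => PySem.Str.isIn k text) then r.2.2 else acc

def map_legacy_subcategory_alt (category : String) (subcategory : String) (description : String) : String :=
  match PySem.Dict.get? pvRulesTable category with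
  | none => "other_assets"
  | some (keep, rules, dflt) =>
    let sl := PySem.Str.lower subcategory
    let dl := PySem.Str.lower description
    -- back-to-front: fold the REVERSED rules, later (higher-priority) overwrites win
    let result := rules.reverse.foldl (pvOverwrite sl dl) dflt
    if keep.contains subcategory then subcategory else result

-- ===== PRECONDITION & SPEC =====
def Spec_map_legacy_subcategory (category : String) (subcategory : String) (description : String) (out : String) : Prop := out = map_legacy_subcategory_alt category subcategory description
instance (category : String) (subcategory : String) (description : String) (out : String) : Decidable (Spec_map_legacy_subcategory category subcategory description out) := by unfold Spec_map_legacy_subcategory; infer_instance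

-- ===== CLAIM (what is proved, stated in full; the proofs are below) =====
def Claim_equal_map_legacy_subcategory : Prop := ∀ (category : String) (subcategory : String) (description : String), Dom_map_legacy_subcategory category subcategory description → Spec_map_legacy_subcategory category subcategory description (map_legacy_subcategory category subcategory description)

-- ===== LEMMAS AND PROOFS =====

theorem pv_if_or (a b : Prop) [Decidable a] [Decidable b] (r x : String) :
    (if a ∨ b then r else x) = (if a then r else if b then r else x) := by
  by_cases ha : a <;> by_cases hb : b <;> simp [ha, hb]

theorem pv_beq_comm (a b : String) : (a == b) = (b == a) := by
  by_cases h : a = b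
  · simp [h]
  · simp [h, Ne.symm h]

-- ===== VERDICT (by name: the statement is the Claim_ definition above) =====
theorem map_legacy_subcategory_spec : Claim_equal_map_legacy_subcategory := by
  intro category subcategory description _
  unfold Spec_map_legacy_subcategory map_legacy_subcategory map_legacy_subcategory_alt
  have hsub : (if subcategory == "" then "" else subcategory) = subcategory := by
    by_cases h : subcategory = "" <;> simp [h]
  simp only [hsub, pvRulesTable, PySem.Dict.get?]
  cases hA : category == "assets"
  case true =>
    have hA' : ("assets" == category) = true := by rw [pv_beq_comm]; exact hA
    simp [List.find?, hA', List.reverse_cons, List.reverse_nil, List.foldl, pvOverwrite, pv_if_or]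
  case false =>
  have hA' : ("assets" == category) = false := by rw [pv_beq_comm]; exact hA
  cases hL : category == "liabilities"
  case true =>
    have hL' : ("liabilities" == category) = true := by rw [pv_beq_comm]; exact hL
    simp [List.find?, hA', hL', List.reverse_cons, List.reverse_nil, List.foldl, pvOverwrite]
  case false =>
  have hL' : ("liabilities" == category) = false := by rw [pv_beq_comm]; exact hL
  cases hI : category == "income"
  case true =>
    have hI' : ("income" == category) = true := by rw [pv_beq_comm]; exact hI
    simp [List.find?, hA', hL', hI', List.reverse_cons, List.reverse_nil, List.foldl, pvOverwrite]
  case false =>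
  have hI' : ("income" == category) = false := by rw [pv_beq_comm]; exact hI
  cases hE : category == "expenses"
  case true =>
    have hE' : ("expenses" == category) = true := by rw [pv_beq_comm]; exact hE
    simp [List.find?, hA', hL', hI', hE', List.reverse_cons, List.reverse_nil, List.foldl, pvOverwrite]
  case false =>
  have hE' : ("expenses" == category) = false := by rw [pv_beq_comm]; exact hE
  simp [List.find?, hA', hL', hI', hE']
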